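-- pv_equiv track=rewrite | github.com/JakubCzachor/mta-led-board | python/src/colors.py | choose_color_for_routes
-- ===== SOURCE A (Python) =====
-- from typing import Dict, Tuple, Iterable
--
-- ROUTE_RGB: Dict[str, Tuple[int, int, int]] = {
--     "A": (0, 57, 166), "C": (0, 57, 166), "E": (0, 57, 166),
--     "B": (255, 99, 25), "D": (255, 99, 25), "F": (255, 99, 25), "M": (255, 99, 25),
--     "G": (108, 190, 69),
--     "J": (163, 130, 78), "Z": (163, 130, 78),
--     "L": (167, 169, 172),
--     "N": (252, 204, 10), "Q": (252, 204, 10), "R": (252, 204, 10), "W": (252, 204, 10),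
--     "1": (238, 53, 46), "2": (238, 53, 46), "3": (238, 53, 46),
--     "4": (0, 147, 60), "5": (0, 147, 60), "6": (0, 147, 60),
--     "7": (185, 51, 173),
--     "S": (155, 155, 155), "FS": (155, 155, 155),
--     "H": (0, 57, 166),
--     "SI": (0, 57, 166),
-- }
--
-- LETTER_PRIORITY = ["A","B","C","D","E","F","G","J","L","M","N","Q","R","W","Z"]
--
-- DIGIT_PRIORITY  = [str(i) for i in range(1,8)]
--
-- TAIL_PRIORITY   = ["S","FS","H","SI"]
--
-- def choose_color_for_routes(routes: Iterable[str]) -> Tuple[int, int, int]: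
--     uniq = [r for r in { (r or "").strip().upper() for r in routes } if r]
--     if not uniq:
--         return (80, 80, 80)
--     for code in LETTER_PRIORITY:
--         if code in uniq: return ROUTE_RGB.get(code, (80,80,80))
--     for code in DIGIT_PRIORITY:
--         if code in uniq: return ROUTE_RGB.get(code, (80,80,80))
--     for code in TAIL_PRIORITY:
--         if code in uniq: return ROUTE_RGB.get(code, (80,80,80))
--     for r in uniq:
--         if r in ROUTE_RGB: return ROUTE_RGB[r]
--     return (80, 80, 80)
-- ===== SOURCE B (Python) =====
-- from typing import Tuple, Iterable
--
-- # Codes in overall priority order (letters, digits, tail), each with its color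
-- # packed as a single 0xRRGGBB integer.
-- _BY_RANK = [
--     ("A", 0x0039A6), ("B", 0xFF6319), ("C", 0x0039A6), ("D", 0xFF6319), ("E", 0x0039A6),
--     ("F", 0xFF6319), ("G", 0x6CBE45), ("J", 0xA3824E), ("L", 0xA7A9AC), ("M", 0xFF6319),
--     ("N", 0xFCCC0A), ("Q", 0xFCCC0A), ("R", 0xFCCC0A), ("W", 0xFCCC0A), ("Z", 0xA3824E),
--     ("1", 0xEE352E), ("2", 0xEE352E), ("3", 0xEE352E), ("4", 0x00933C), ("5", 0x00933C),
--     ("6", 0x00933C), ("7", 0xB933AD),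
--     ("S", 0x9B9B9B), ("FS", 0x9B9B9B), ("H", 0x0039A6), ("SI", 0x0039A6),
-- ]
-- _RANK = {c: i for i, (c, _) in enumerate(_BY_RANK)}
--
-- def choose_color_for_routes(routes: Iterable[str]) -> Tuple[int, int, int]:
--     found = {_RANK[c] for c in ((r or "").strip().upper() for r in routes) if c in _RANK}
--     if not found:
--         return (80, 80, 80)
--     packed = _BY_RANK[min(found)][1]
--     return (packed >> 16, (packed >> 8) & 255, packed & 255)
-- ===== Notes on version B (the rewrite author's own statement) =====
-- stated objective: alternative
-- what changed: Replaces the three staged membership scans over separate priority lists (plus the dead trailing ROUTE_RGB fallback loop, unreachable since every ROUTE_RGB key occurs in a priority list) by a single priority-ordered table of colors packed as 0xRRGGBB integers with a code->rank dict: B collects the set of ranks present among the normalized routes, takes the minimum rank, and bit-decodes that entry's packed color.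
import Mathlib
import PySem

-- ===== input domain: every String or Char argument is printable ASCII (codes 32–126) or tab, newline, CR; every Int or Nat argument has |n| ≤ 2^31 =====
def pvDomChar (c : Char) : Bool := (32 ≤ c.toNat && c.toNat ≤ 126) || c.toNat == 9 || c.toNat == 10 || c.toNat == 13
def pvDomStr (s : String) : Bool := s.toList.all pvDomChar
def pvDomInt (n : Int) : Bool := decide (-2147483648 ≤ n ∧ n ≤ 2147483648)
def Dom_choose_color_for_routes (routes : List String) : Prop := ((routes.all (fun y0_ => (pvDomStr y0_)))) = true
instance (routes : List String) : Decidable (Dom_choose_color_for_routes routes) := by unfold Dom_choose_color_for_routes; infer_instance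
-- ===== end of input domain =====

-- B replaces A's set-dedup plus three staged priority-list scans (and A's dead ROUTE_RGB
-- fallback loop) by one rank table over a single priority-ordered list of packed 0xRRGGBB
-- colors, collecting the set of ranks present and decoding the color of the minimum rank.


-- ===== PORT A =====
def ROUTE_RGB : PySem.Dict String (Int × Int × Int) :=
  PySem.Dict.mk [("A",(0,57,166)),("C",(0,57,166)),("E",(0,57,166)),
   ("B",(255,99,25)),("D",(255,99,25)),("F",(255,99,25)),("M",(255,99,25)),
   ("G",(108,190,69)),("J",(163,130,78)),("Z",(163,130,78)),
   ("L",(167,169,172)),("N",(252,204,10)),("Q",(252,204,10)),("R",(252,204,10)),("W",(252,204,10)),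
   ("1",(238,53,46)),("2",(238,53,46)),("3",(238,53,46)),
   ("4",(0,147,60)),("5",(0,147,60)),("6",(0,147,60)),
   ("7",(185,51,173)),("S",(155,155,155)),("FS",(155,155,155)),
   ("H",(0,57,166)),("SI",(0,57,166))]

def LETTER_PRIORITY : List String := ["A","B","C","D","E","F","G","J","L","M","N","Q","R","W","Z"]

def DIGIT_PRIORITY : List String := (PySem.List.pyRange 1 8 1).map PySem.Int.toStr

def TAIL_PRIORITY : List String := ["S","FS","H","SI"]

-- '(r or "").strip().upper()' — for a string r, 'r or ""' is r itself ('' stays '')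
def pyNormA (r : String) : String := PySem.Str.upper (PySem.Str.strip r)

def choose_color_for_routes (routes : List String) : Int × Int × Int :=
  let uniq := (PySem.Set.ofList (routes.map (fun r => pyNormA r))).filter (fun r => r != "")
  if uniq = [] then (80, 80, 80)
  else
    match LETTER_PRIORITY.find? (fun code => uniq.contains code) with
    | some code => ROUTE_RGB.getD code (80, 80, 80)
    | none =>
      match DIGIT_PRIORITY.find? (fun code => uniq.contains code) with
      | some code => ROUTE_RGB.getD code (80, 80, 80)
      | none =>
        match TAIL_PRIORITY.find? (fun code => uniq.contains code) with
        | some code => ROUTE_RGB.getD code (80, 80, 80)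
        | none =>
          -- 'if r in ROUTE_RGB: return ROUTE_RGB[r]' (the lookup always succeeds when contains holds)
          match uniq.find? (fun r => ROUTE_RGB.contains r) with
          | some r => ROUTE_RGB.getD r (80, 80, 80)
          | none => (80, 80, 80)

-- ===== PORT B =====
-- codes in overall priority order, each with its color packed as one 0xRRGGBB integer
def BY_RANK : List (String × Int) :=
  [("A", 0x0039A6), ("B", 0xFF6319), ("C", 0x0039A6), ("D", 0xFF6319), ("E", 0x0039A6),
   ("F", 0xFF6319), ("G", 0x6CBE45), ("J", 0xA3824E), ("L", 0xA7A9AC), ("M", 0xFF6319),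
   ("N", 0xFCCC0A), ("Q", 0xFCCC0A), ("R", 0xFCCC0A), ("W", 0xFCCC0A), ("Z", 0xA3824E),
   ("1", 0xEE352E), ("2", 0xEE352E), ("3", 0xEE352E), ("4", 0x00933C), ("5", 0x00933C),
   ("6", 0x00933C), ("7", 0xB933AD),
   ("S", 0x9B9B9B), ("FS", 0x9B9B9B), ("H", 0x0039A6), ("SI", 0x0039A6)]

-- _RANK = {c: i for i, (c, _) in enumerate(_BY_RANK)}
def RANKB : PySem.Dict String Int :=
  (PySem.List.enumerate BY_RANK 0).foldl (fun d p => d.insert p.2.1 p.1) (PySem.Dict.mk [])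

-- '(r or "").strip().upper()' in B's generator
def normB (r : String) : String := PySem.Str.upper (PySem.Str.strip r)

def choose_color_for_routes_alt (routes : List String) : Int × Int × Int :=
  -- {_RANK[c] for c in (norm(r) for r in routes) if c in _RANK}: lookup succeeds iff the key is in _RANK
  let found : PySem.Set Int :=
    PySem.Set.ofList ((routes.map (fun r => normB r)).filterMap (fun c => RANKB.get? c))
  match PySem.List.min? found (fun x => x) with
  | none => (80, 80, 80)
  | some i =>
    let packed := (PySem.List.pyGetD BY_RANK i ("", 0)).2   -- index always in range (ranks are 0..25)
    (packed >>> 16, PySem.Int.band (packed >>> 8) 255, PySem.Int.band packed 255)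

-- ===== PRECONDITION & SPEC =====
def Spec_choose_color_for_routes (routes : List String) (out : Int × Int × Int) : Prop := out = choose_color_for_routes_alt routes
instance (routes : List String) (out : Int × Int × Int) : Decidable (Spec_choose_color_for_routes routes out) := by unfold Spec_choose_color_for_routes; infer_instance

-- ===== CLAIM (what is proved, stated in full; the proofs are below) =====
def Claim_equal_choose_color_for_routes : Prop := ∀ (routes : List String), Dom_choose_color_for_routes routes → Spec_choose_color_for_routes routes (choose_color_for_routes routes)

-- ===== LEMMAS AND PROOFS =====

def PRIORITY_ALL : List String := LETTER_PRIORITY ++ DIGIT_PRIORITY ++ TAIL_PRIORITY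

-- first index (counting from offset i) of m in a priority list — what B's rank table stores
def rkOf : List String → Int → String → Option Int
  | [], _, _ => none
  | c :: cs, i, m => if c == m then some i else rkOf cs (i+1) m

-- first element of P (with its offset index) that occurs in M
def fstHit : List String → Int → List String → Option (Int × String)
  | [], _, _ => none
  | c :: cs, i, M => if M.contains c then some (i, c) else fstHit cs (i+1) M

lemma rkOf_none {P : List String} {m : String} (h : m ∉ P) (i : Int) : rkOf P i m = none := by
  induction P generalizing i with
  | nil => rfl
  | cons c cs ih =>
    have hne : (c == m) = false := by
      rcases hb : (c == m) with _ | _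
      · rfl
      · exact absurd (List.mem_cons_self ..) ((eq_of_beq hb) ▸ h)
    simp only [rkOf, hne]
    exact ih (fun hm => h (List.mem_cons_of_mem c hm)) (i + 1)

lemma rkOf_ge {P : List String} {i j : Int} {m : String} (h : rkOf P i m = some j) : i ≤ j := by
  induction P generalizing i with
  | nil => simp [rkOf] at h
  | cons c cs ih =>
    simp only [rkOf] at h
    split at h
    · injection h with h; omega
    · have := ih h; omega

lemma rkOf_spec {P : List String} {i j : Int} {m : String} (h : rkOf P i m = some j) :
    ∃ k : Nat, j = i + (k : Int) ∧ k < P.length ∧ P.getD k "" = m := by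
  induction P generalizing i with
  | nil => simp [rkOf] at h
  | cons c cs ih =>
    simp only [rkOf] at h
    split at h
    · injection h with h
      exact ⟨0, by omega, by simp, (eq_of_beq (by assumption))⟩
    · obtain ⟨k, hk1, hk2, hk3⟩ := ih h
      exact ⟨k + 1, by push_cast; omega, by simpa using hk2, by simpa using hk3⟩

-- the rank-table fold looked up: first index of m among the keys, else what was there before
lemma get?_foldl_insert_enum (P : List (String × Int)) (hnd : (P.map (·.1)).Nodup) :
    ∀ (i : Int) (d : PySem.Dict String Int) (m : String),
      ((PySem.List.enumerate P i).foldl (fun d p => d.insert p.2.1 p.1) d).get? m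
        = (rkOf (P.map (·.1)) i m).or (d.get? m) := by
  induction P with
  | nil => intro i d m; rfl
  | cons c cs ih =>
    intro i d m
    rw [PySem.List.enumerate_cons, List.foldl_cons]
    simp only [List.map_cons] at hnd ⊢
    rw [ih (List.Nodup.of_cons hnd) (i + 1) (d.insert c.1 i) m]
    rcases hb : (c.1 == m) with _ | _
    · simp only [rkOf, hb, Bool.false_eq_true, if_false]
      rw [PySem.Dict.get?_insert_of_ne d i (fun he => by rw [he] at hb; simp at hb)]
    · have hcm : c.1 = m := eq_of_beq hb
      have hnotin : m ∉ cs.map (·.1) := hcm ▸ (List.nodup_cons.mp hnd).1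
      simp only [rkOf, hb, if_true, rkOf_none hnotin, Option.none_or]
      rw [hcm, PySem.Dict.get?_insert_self, Option.some_or]

lemma codes_eq : BY_RANK.map (·.1) = PRIORITY_ALL := by decide

lemma rank_get (m : String) : RANKB.get? m = rkOf PRIORITY_ALL 0 m := by
  have hnd : (BY_RANK.map (·.1)).Nodup := by decide
  rw [RANKB, get?_foldl_insert_enum BY_RANK hnd 0 (PySem.Dict.mk []) m, codes_eq]
  rcases rkOf PRIORITY_ALL 0 m with _ | j <;> rfl

lemma fstHit_none {P : List String} {M : List String} (i : Int) (h : fstHit P i M = none) :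
    ∀ m ∈ M, rkOf P i m = none := by
  induction P generalizing i with
  | nil => intro m _; rfl
  | cons c cs ih =>
    simp only [fstHit] at h
    rcases hc : M.contains c with _ | _
    · rw [hc] at h
      simp only [Bool.false_eq_true, if_false] at h
      intro m hm
      have hne : (c == m) = false := by
        rcases hb : (c == m) with _ | _
        · rfl
        · rw [eq_of_beq hb, List.contains_iff_mem.mpr hm] at hc; simp at hc
      simp only [rkOf, hne, Bool.false_eq_true, if_false]
      exact ih (i + 1) h m hm
    · rw [hc] at h; simp at h

lemma fstHit_some {P M : List String} {i : Int} {p : Int × String} (h : fstHit P i M = some p) :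
    rkOf P i p.2 = some p.1 ∧ p.2 ∈ M ∧ ∀ m ∈ M, ∀ k, rkOf P i m = some k → p.1 ≤ k := by
  induction P generalizing i with
  | nil => simp [fstHit] at h
  | cons c cs ih =>
    simp only [fstHit] at h
    rcases hc : M.contains c with _ | _
    · rw [hc] at h
      simp only [Bool.false_eq_true, if_false] at h
      obtain ⟨h1, h2, h3⟩ := ih h
      have hnm : ∀ m ∈ M, (c == m) = false := by
        intro m hm
        rcases hb : (c == m) with _ | _
        · rfl
        · rw [eq_of_beq hb, List.contains_iff_mem.mpr hm] at hc; simp at hc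
      refine ⟨?_, h2, ?_⟩
      · simp only [rkOf, hnm p.2 h2, Bool.false_eq_true, if_false]; exact h1
      · intro m hm k hk
        simp only [rkOf, hnm m hm, Bool.false_eq_true, if_false] at hk
        exact h3 m hm k hk
    · rw [hc] at h
      simp only [if_true] at h
      obtain rfl : p = (i, c) := by injection h with h; exact h.symm
      refine ⟨by simp [rkOf], List.contains_iff_mem.mp hc, ?_⟩
      intro m _ k hk
      exact rkOf_ge hk

-- B's min over the set of ranks present IS the index of A's first priority hit
lemma min_ranks_eq_fstHit (P : List String) (i : Int) (M : List String) :
    PySem.List.min? (PySem.Set.ofList (M.filterMap (fun c => rkOf P i c))) (fun x => x)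
      = (fstHit P i M).map Prod.fst := by
  cases h : fstHit P i M with
  | none =>
    have hnil : M.filterMap (fun c => rkOf P i c) = [] :=
      List.filterMap_eq_nil_iff.mpr (fstHit_none i h)
    rw [hnil]
    rfl
  | some p =>
    obtain ⟨h1, h2, h3⟩ := fstHit_some h
    have hjL : p.1 ∈ M.filterMap (fun c => rkOf P i c) :=
      List.mem_filterMap.mpr ⟨p.2, h2, h1⟩
    have hjS : p.1 ∈ PySem.Set.ofList (M.filterMap (fun c => rkOf P i c)) :=
      (PySem.Set.mem_ofList _ _).mpr hjL
    cases hm : PySem.List.min? (PySem.Set.ofList (M.filterMap (fun c => rkOf P i c))) (fun x => x) with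
    | none =>
      rw [PySem.List.min?_eq_none_iff] at hm
      rw [hm] at hjS
      simp at hjS
    | some v =>
      have hvS := PySem.List.min?_mem hm
      have hvL : v ∈ M.filterMap (fun c => rkOf P i c) := (PySem.Set.mem_ofList _ _).mp hvS
      obtain ⟨m, hmM, hmv⟩ := List.mem_filterMap.mp hvL
      have hle1 : p.1 ≤ v := h3 m hmM v hmv
      have hle2 : v ≤ p.1 := PySem.List.min?_isMin hm p.1 hjS
      have : v = p.1 := le_antisymm hle2 hle1
      rw [this, Option.map_some]

-- the packed table decodes, rank by rank, to exactly A's color dict at the priority code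
lemma color_align : ∀ k : Nat, k < 26 →
    ROUTE_RGB.getD (PRIORITY_ALL.getD k "") (80, 80, 80)
      = ((BY_RANK.getD k ("", 0)).2 >>> 16,
         PySem.Int.band ((BY_RANK.getD k ("", 0)).2 >>> 8) 255,
         PySem.Int.band (BY_RANK.getD k ("", 0)).2 255) := by decide

lemma find?_congr' {l : List String} {p q : String → Bool} (h : ∀ a ∈ l, p a = q a) :
    l.find? p = l.find? q := by
  induction l with
  | nil => rfl
  | cons a l ih =>
    rw [List.find?_cons, List.find?_cons, h a (by simp)]
    split
    · rfl
    · exact ih fun a ha => h a (by simp [ha])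

lemma fstHit_map_snd (P : List String) (i : Int) (M : List String) :
    (fstHit P i M).map Prod.snd = P.find? (fun c => M.contains c) := by
  induction P generalizing i with
  | nil => rfl
  | cons c cs ih =>
    rcases hc : M.contains c with _ | _
    · unfold fstHit; rw [hc, List.find?_cons, hc]; simp [ih]
    · unfold fstHit; rw [hc, List.find?_cons, hc]; rfl

lemma uniq_contains (M : List String) (c : String) (hc : c ≠ "") :
    (((PySem.Set.ofList M).filter (fun r => r != "")).contains c) = M.contains c := by
  rcases h : M.contains c with _ | _
  · rcases h2 : (((PySem.Set.ofList M).filter (fun r => r != "")).contains c) with _ | _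
    · rfl
    · exfalso
      have hm : c ∈ (PySem.Set.ofList M).filter (fun r => r != "") := List.contains_iff_mem.mp h2
      have hcM : c ∈ M := (PySem.Set.mem_ofList M c).mp (List.mem_of_mem_filter hm)
      rw [List.contains_iff_mem.mpr hcM] at h; simp at h
  · have hm : c ∈ M := List.contains_iff_mem.mp h
    exact List.contains_iff_mem.mpr
      (List.mem_filter.mpr ⟨(PySem.Set.mem_ofList M c).mpr hm, by simpa using hc⟩)

lemma keys_sub_priority : ∀ r : String, ROUTE_RGB.contains r = true → r ∈ PRIORITY_ALL := by
  have hsub : ∀ x ∈ ROUTE_RGB.keys, x ∈ PRIORITY_ALL := by decide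
  intro r h
  have hmem : r ∈ ROUTE_RGB.keys := by
    have h2 := PySem.Dict.contains_eq_decide_mem_keys ROUTE_RGB r
    rw [h] at h2
    exact of_decide_eq_true h2.symm
  exact hsub r hmem

-- A's result, in terms of a single scan of the concatenated priority list
lemma A_norm (routes : List String) :
    choose_color_for_routes routes =
      match PRIORITY_ALL.find? (fun c => (routes.map (fun r => pyNormA r)).contains c) with
      | some code => ROUTE_RGB.getD code (80, 80, 80)
      | none => (80, 80, 80) := by
  unfold choose_color_for_routes
  dsimp only []
  set M := routes.map (fun r => pyNormA r) with hM
  set U := (PySem.Set.ofList M).filter (fun r => r != "") with hU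
  have hcont : ∀ c, c ≠ "" → U.contains c = M.contains c := fun c hc => uniq_contains M c hc
  have hPne : ∀ c ∈ PRIORITY_ALL, c ≠ "" := by decide
  have hL : LETTER_PRIORITY.find? (fun code => U.contains code)
      = LETTER_PRIORITY.find? (fun c => M.contains c) :=
    find?_congr' fun a ha => hcont a (hPne a (by simp [PRIORITY_ALL, ha]))
  have hD : DIGIT_PRIORITY.find? (fun code => U.contains code)
      = DIGIT_PRIORITY.find? (fun c => M.contains c) :=
    find?_congr' fun a ha => hcont a (hPne a (by simp [PRIORITY_ALL, ha]))
  have hT : TAIL_PRIORITY.find? (fun code => U.contains code)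
      = TAIL_PRIORITY.find? (fun c => M.contains c) :=
    find?_congr' fun a ha => hcont a (hPne a (by simp [PRIORITY_ALL, ha]))
  have hsplit : PRIORITY_ALL.find? (fun c => M.contains c)
      = ((LETTER_PRIORITY.find? (fun c => M.contains c)).or
        ((DIGIT_PRIORITY.find? (fun c => M.contains c)).or
          (TAIL_PRIORITY.find? (fun c => M.contains c)))) := by
    rw [show PRIORITY_ALL = LETTER_PRIORITY ++ (DIGIT_PRIORITY ++ TAIL_PRIORITY) by
      rw [PRIORITY_ALL, List.append_assoc]]
    rw [List.find?_append, List.find?_append]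
  by_cases hE : U = []
  · rw [if_pos hE]
    have hnone : PRIORITY_ALL.find? (fun c => M.contains c) = none := by
      rw [List.find?_eq_none]
      intro c hcP hcontra
      have h1 := hcont c (hPne c hcP)
      rw [hE] at h1
      simp only [List.contains_nil] at h1
      rw [hcontra] at h1
      simp at h1
    rw [hnone]
  · rw [if_neg hE, hL, hD, hT, hsplit]
    rcases hfL : LETTER_PRIORITY.find? (fun c => M.contains c) with _ | code
    · rcases hfD : DIGIT_PRIORITY.find? (fun c => M.contains c) with _ | code
      · rcases hfT : TAIL_PRIORITY.find? (fun c => M.contains c) with _ | code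
        · have hfb : U.find? (fun r => ROUTE_RGB.contains r) = none := by
            rw [List.find?_eq_none]
            intro r hr hcr
            have hrP : r ∈ PRIORITY_ALL := keys_sub_priority r hcr
            have hrM : M.contains r = true := by
              rw [hU] at hr
              exact List.contains_iff_mem.mpr
                ((PySem.Set.mem_ofList M r).mp (List.mem_of_mem_filter hr))
            have hnone : PRIORITY_ALL.find? (fun c => M.contains c) = none := by
              rw [hsplit, hfL, hfD, hfT]; rfl
            rw [List.find?_eq_none] at hnone
            exact (hnone r hrP) hrM
          rw [hfb]
          rfl
        · rfl
      · rfl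
    · rfl

-- ===== VERDICT (by name: the statement is the Claim_ definition above) =====
theorem choose_color_for_routes_spec : Claim_equal_choose_color_for_routes := by
  intro routes _
  unfold Spec_choose_color_for_routes
  rw [A_norm routes]
  unfold choose_color_for_routes_alt
  dsimp only []
  have hnorm : (routes.map (fun r => normB r)) = routes.map (fun r => pyNormA r) := rfl
  have hget : (fun c => RANKB.get? c) = (fun c => rkOf PRIORITY_ALL 0 c) := funext rank_get
  rw [hnorm, hget, min_ranks_eq_fstHit PRIORITY_ALL 0 (routes.map (fun r => pyNormA r)),
    ← fstHit_map_snd PRIORITY_ALL 0]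
  cases h : fstHit PRIORITY_ALL 0 (routes.map (fun r => pyNormA r)) with
  | none => rfl
  | some p =>
    obtain ⟨h1, _, _⟩ := fstHit_some h
    obtain ⟨k, hk1, hk2, hk3⟩ := rkOf_spec h1
    simp only [Option.map_some]
    have hp1 : p.1 = (k : Int) := by omega
    have hlen : k < 26 := by
      have : PRIORITY_ALL.length = 26 := by decide
      omega
    rw [hp1]
    have hdg : PySem.List.pyGetD BY_RANK (k : Int) ("", 0) = BY_RANK.getD k ("", 0) := by
      simp [PySem.List.pyGetD_natCast]
    rw [hdg, ← hk3, List.getD_eq_getElem?_getD]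
    have := color_align k hlen
    rw [List.getD_eq_getElem?_getD] at this
    exact this.symm ▸ rfl
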